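-- pv_equiv track=rewrite | github.com/Migisen/misis_hw | hw3/task10.py | visualise_sequence
-- ===== SOURCE A (Python) =====
-- from typing import List
--
-- def visualise_sequence(sequence: List[int], selected_idx: int) -> str:
--     result_str = ''
--     for idx, number in enumerate(sequence):
--         if idx != selected_idx:
--             result_str += f'{number} '
--         else:
--             result_str += f'[ {number} ] '
--     return result_str.replace('  ', ' ')
-- ===== SOURCE B (Python) =====
-- from typing import List
--
-- def _plain(xs):
--     return ''.join('%d ' % x for x in xs)
--
-- def visualise_sequence(sequence: List[int], selected_idx: int) -> str:
--     if 0 <= selected_idx < len(sequence):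
--         return (_plain(sequence[:selected_idx])
--                 + '[ %d ] ' % sequence[selected_idx]
--                 + _plain(sequence[selected_idx + 1:]))
--     return _plain(sequence)
-- ===== Notes on version B (the rewrite author's own statement) =====
-- stated objective: alternative
-- what changed: B splits the list into left slice / selected element / right slice and formats each segment uniformly (no per-element index comparison, no accumulation branch, no final replace pass), instead of A's enumerate loop that branches on the index at every element and then scrubs double spaces.
import Mathlib
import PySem

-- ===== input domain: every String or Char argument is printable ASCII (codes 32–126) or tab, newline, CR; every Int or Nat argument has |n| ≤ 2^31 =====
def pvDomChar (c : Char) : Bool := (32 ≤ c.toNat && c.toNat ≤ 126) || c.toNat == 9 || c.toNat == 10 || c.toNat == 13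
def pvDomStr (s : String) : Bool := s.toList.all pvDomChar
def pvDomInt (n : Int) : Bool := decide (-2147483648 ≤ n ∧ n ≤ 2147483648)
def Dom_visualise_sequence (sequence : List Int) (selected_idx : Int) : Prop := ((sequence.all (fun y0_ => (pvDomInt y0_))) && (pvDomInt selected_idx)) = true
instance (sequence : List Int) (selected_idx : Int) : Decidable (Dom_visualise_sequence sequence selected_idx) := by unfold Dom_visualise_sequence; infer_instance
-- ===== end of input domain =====

-- B splits the sequence into left slice / selected element / right slice and formats each
-- segment uniformly, instead of A's per-element index branch plus a final replace pass;
-- objective: alternative (same cost, selection logic moved out of the loop entirely).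


-- ===== PORT A =====
def visualise_sequence (sequence : List Int) (selected_idx : Int) : String :=
  let result_str := (PySem.List.enumerate sequence).foldl
    (fun acc p =>
      if p.1 ≠ selected_idx then acc ++ (PySem.Int.toStr p.2 ++ " ")
      else acc ++ ("[ " ++ PySem.Int.toStr p.2 ++ " ] ")) ""
  PySem.Str.replace result_str "  " " "

-- ===== PORT B =====
-- ''.join('%d ' % x for x in xs)
def pvPlain (xs : List Int) : String :=
  PySem.Str.join "" (xs.map (fun x => PySem.Int.toStr x ++ " "))

def visualise_sequence_alt (sequence : List Int) (selected_idx : Int) : String :=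
  if 0 ≤ selected_idx ∧ selected_idx < (sequence.length : Int) then
    pvPlain (PySem.List.slice sequence none (some selected_idx))
      ++ ("[ " ++ PySem.Int.toStr ((PySem.List.pyGet? sequence selected_idx).getD 0) ++ " ] ")
      -- pyGet? is some here (0 ≤ selected_idx < len), the default 0 is never used
      ++ pvPlain (PySem.List.slice sequence (some (selected_idx + 1)) none)
  else pvPlain sequence

-- ===== PRECONDITION & SPEC =====
def Spec_visualise_sequence (sequence : List Int) (selected_idx : Int) (out : String) : Prop := out = visualise_sequence_alt sequence selected_idx
instance (sequence : List Int) (selected_idx : Int) (out : String) : Decidable (Spec_visualise_sequence sequence selected_idx out) := by unfold Spec_visualise_sequence; infer_instance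

-- ===== CLAIM (what is proved, stated in full; the proofs are below) =====
def Claim_equal_visualise_sequence : Prop := ∀ (sequence : List Int) (selected_idx : Int), Dom_visualise_sequence sequence selected_idx → Spec_visualise_sequence sequence selected_idx (visualise_sequence sequence selected_idx)

-- ===== LEMMAS AND PROOFS =====

-- "no two adjacent spaces" relation
def pvR (a b : Char) : Prop := ¬ (a = ' ' ∧ b = ' ')

-- the plain token for one number, and the bracketed one
def pvTok (n : Int) : List Char := PySem.Int.toChars n
def pvBTok (n : Int) : List Char := '[' :: ' ' :: (PySem.Int.toChars n ++ [' ', ']'])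

-- token list of A's loop, starting at index k
def pvToks (sel : Int) : List Int → Int → List (List Char)
  | [], _ => []
  | n :: t, k => (if k ≠ sel then pvTok n else pvBTok n) :: pvToks sel t (k + 1)

theorem pvToks_out (sel : Int) (xs : List Int) (k : Int)
    (h : sel < k ∨ (k + xs.length : Int) ≤ sel) :
    pvToks sel xs k = xs.map pvTok := by
  induction xs generalizing k with
  | nil => rfl
  | cons n t ih =>
    have hk : k ≠ sel := by simp at h ⊢; omega
    simp only [pvToks, if_pos hk, List.map_cons]
    rw [ih (k + 1) (by simp at h ⊢; omega)]

-- A's tokens split around an in-range selected index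
theorem pvToks_split (xs : List Int) (k : Int) (s : Nat) (h : s < xs.length) :
    pvToks (k + s) xs k =
      (xs.take s).map pvTok ++ pvBTok (xs[s]'h) :: (xs.drop (s + 1)).map pvTok := by
  induction xs generalizing k s with
  | nil => simp at h
  | cons n t ih =>
    cases s with
    | zero =>
      have hk : ¬ (k ≠ k + (0 : Nat)) := by simp
      simp only [pvToks, if_neg hk, List.take_zero, List.map_nil, List.nil_append,
        List.getElem_cons_zero, List.drop_succ_cons, List.drop_zero]
      rw [pvToks_out (k + (0 : Nat)) t (k + 1) (by push_cast; omega)]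
    | succ j =>
      have hj : j < t.length := by simpa using Nat.lt_of_succ_lt_succ h
      have hk : k ≠ k + ((j + 1 : Nat) : Int) := by push_cast; omega
      simp only [pvToks, if_pos hk, List.take_succ_cons, List.map_cons,
        List.getElem_cons_succ, List.drop_succ_cons, List.cons_append]
      have harg : k + ((j + 1 : Nat) : Int) = (k + 1) + (j : Nat) := by push_cast; ring
      rw [harg, ih (k + 1) j hj]

theorem pvDigitChar_ne_space (m : Nat) : Nat.digitChar m ≠ ' ' := by
  by_cases h : m < 16
  · interval_cases m <;> decide
  · have : Nat.digitChar m = '*' := by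
      unfold Nat.digitChar
      rw [if_neg (by omega), if_neg (by omega), if_neg (by omega), if_neg (by omega),
          if_neg (by omega), if_neg (by omega), if_neg (by omega), if_neg (by omega),
          if_neg (by omega), if_neg (by omega), if_neg (by omega), if_neg (by omega),
          if_neg (by omega), if_neg (by omega), if_neg (by omega), if_neg (by omega)]
    rw [this]; decide

theorem pvToDigitsCore_ne_space (b : Nat) :
    ∀ (fuel n : Nat) (acc : List Char), (∀ c ∈ acc, c ≠ ' ') →
      ∀ c ∈ Nat.toDigitsCore b fuel n acc, c ≠ ' ' := by
  intro fuel
  induction fuel with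
  | zero =>
    intro n acc hacc c hc
    rw [Nat.toDigitsCore] at hc
    exact hacc c hc
  | succ f ih =>
    intro n acc hacc c hc
    rw [Nat.toDigitsCore] at hc
    have hacc' : ∀ c ∈ (n % b).digitChar :: acc, c ≠ ' ' := by
      intro c hc
      rcases List.mem_cons.mp hc with h | h
      · subst h; exact pvDigitChar_ne_space _
      · exact hacc c h
    split at hc
    · exact hacc' c hc
    · exact ih _ _ hacc' c hc

theorem pvToDigitsCore_ne_nil (b : Nat) :
    ∀ (fuel n : Nat) (acc : List Char), acc ≠ [] → Nat.toDigitsCore b fuel n acc ≠ [] := by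
  intro fuel
  induction fuel with
  | zero => intro n acc hacc; rw [Nat.toDigitsCore]; exact hacc
  | succ f ih =>
    intro n acc hacc
    rw [Nat.toDigitsCore]
    split
    · simp
    · exact ih _ _ (by simp)

theorem pvToDigits_ne_nil (b n : Nat) : Nat.toDigits b n ≠ [] := by
  unfold Nat.toDigits
  rw [Nat.toDigitsCore]
  split
  · simp
  · exact pvToDigitsCore_ne_nil _ _ _ _ (by simp)

theorem pvToChars_ne_space (n : Int) : ∀ c ∈ PySem.Int.toChars n, c ≠ ' ' := by
  unfold PySem.Int.toChars
  split
  · intro c hc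
    rcases List.mem_cons.mp hc with h | h
    · subst h; decide
    · exact pvToDigitsCore_ne_space _ _ _ _ (by simp) c h
  · exact pvToDigitsCore_ne_space _ _ _ _ (by simp)

theorem pvToChars_ne_nil (n : Int) : PySem.Int.toChars n ≠ [] := by
  unfold PySem.Int.toChars
  split
  · simp
  · exact pvToDigits_ne_nil _ _

-- a good token: nonempty, no space at either end, no two adjacent spaces inside
def pvGood (t : List Char) : Prop :=
  t ≠ [] ∧ t.head? ≠ some ' ' ∧ t.getLast? ≠ some ' ' ∧ List.IsChain pvR t

theorem pvChain_of_spfree (t : List Char) (h : ∀ c ∈ t, c ≠ ' ') : List.IsChain pvR t := by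
  rw [List.isChain_iff_getElem]
  intro i hi ⟨_, h2⟩
  exact h _ (List.getElem_mem _) h2

theorem pvGood_of_spfree (t : List Char) (h0 : t ≠ []) (h : ∀ c ∈ t, c ≠ ' ') : pvGood t := by
  refine ⟨h0, ?_, ?_, pvChain_of_spfree t h⟩
  · intro hh
    exact h _ (List.mem_of_mem_head? hh) rfl
  · intro hh
    exact h _ (List.mem_of_mem_getLast? hh) rfl

theorem pvGood_tok (n : Int) : pvGood (pvTok n) :=
  pvGood_of_spfree _ (pvToChars_ne_nil n) (pvToChars_ne_space n)

theorem pvGood_btok (n : Int) : pvGood (pvBTok n) := by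
  have hx := pvToChars_ne_space n
  have hxn := pvToChars_ne_nil n
  obtain ⟨hgn, hgh, hgl, hgc⟩ := pvGood_of_spfree _ hxn hx
  refine ⟨by simp [pvBTok], by simp [pvBTok], ?_, ?_⟩
  · have : pvBTok n = ('[' :: ' ' :: PySem.Int.toChars n ++ [' ']) ++ [']'] := by
      simp [pvBTok]
    rw [this, List.getLast?_concat]
    decide
  · have hmid : List.IsChain pvR (PySem.Int.toChars n ++ [' ', ']']) := by
      rw [List.isChain_append]
      refine ⟨hgc, by simp [List.isChain_cons_cons, pvR], ?_⟩
      intro a ha b hb ⟨h1, _⟩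
      exact hx a (List.mem_of_mem_getLast? ha) h1
    refine List.IsChain.cons (List.IsChain.cons hmid ?_) (by intro y hy; simp at hy; subst hy; simp [pvR])
    intro y hy
    rw [List.head?_append] at hy
    intro ⟨_, h2⟩
    cases hx' : (PySem.Int.toChars n).head? with
    | none => exact hxn (List.head?_eq_none_iff.mp hx')
    | some c =>
      rw [hx'] at hy
      simp at hy
      subst hy
      exact hx _ (List.mem_of_mem_head? hx') h2

theorem pvGood_toks (sel : Int) (xs : List Int) (k : Int) :
    ∀ t ∈ pvToks sel xs k, pvGood t := by
  induction xs generalizing k with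
  | nil => simp [pvToks]
  | cons n rest ih =>
    intro t ht
    rcases List.mem_cons.mp ht with h | h
    · subst h
      split
      · exact pvGood_tok n
      · exact pvGood_btok n
    · exact ih (k + 1) t h

theorem pvChain_flat (toks : List (List Char)) (h : ∀ t ∈ toks, pvGood t) :
    List.IsChain pvR (toks.flatMap (· ++ [' '])) := by
  induction toks with
  | nil => simp
  | cons t rest ih =>
    obtain ⟨htn, hth, htl, htc⟩ := h t (by simp)
    have hrest := ih (fun u hu => h u (by simp [hu]))
    simp only [List.flatMap_cons]
    rw [List.isChain_append]
    refine ⟨?_, hrest, ?_⟩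
    · rw [List.isChain_append]
      refine ⟨htc, List.isChain_singleton _, ?_⟩
      intro a ha b hb
      simp at hb; subst hb
      intro ⟨h1, _⟩
      rw [ha] at htl
      exact htl (by rw [h1])
    · intro a ha b hb
      rw [List.getLast?_concat] at ha
      cases rest with
      | nil => simp at hb
      | cons u us =>
        obtain ⟨hun, huh, _, _⟩ := h u (by simp)
        simp only [List.flatMap_cons] at hb
        rw [List.append_assoc, List.head?_append] at hb
        cases hu' : u.head? with
        | none => exact absurd (List.head?_eq_none_iff.mp hu') hun
        | some c =>
          rw [hu'] at hb
          simp at hb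
          subst hb
          intro ⟨_, h2⟩
          rw [hu'] at huh
          exact huh (by rw [h2])

theorem pvNoDD (l : List Char) (h : List.IsChain pvR l) : ¬ [' ', ' '] <:+: l := by
  intro hinf
  obtain ⟨s, t, rfl⟩ := hinf
  rw [List.append_assoc, List.isChain_append] at h
  have := (List.isChain_append.mp h.2.1).1
  rw [List.isChain_cons_cons] at this
  exact this.1 ⟨rfl, rfl⟩

theorem pvReplace_go_noop (old new : List Char) :
    ∀ (fuel : Nat) (l acc : List Char), ¬ old <:+: l →
      PySem.Chars.replace.go old new fuel l acc = acc.reverse ++ l := by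
  intro fuel
  induction fuel with
  | zero => intro l acc _; rw [PySem.Chars.replace.go]
  | succ f ih =>
    intro l acc hni
    cases l with
    | nil =>
      rw [PySem.Chars.replace.go]
      · simp
      · omega
    | cons c t =>
      rw [PySem.Chars.replace.go]
      have hnp : old.isPrefixOf (c :: t) = false := by
        rw [Bool.eq_false_iff]
        intro hp
        exact hni ((List.isPrefixOf_iff_prefix.mp hp).isInfix)
      rw [if_neg (by simp [hnp])]
      rw [ih t (c :: acc) (fun h => hni (h.trans (List.suffix_cons c t).isInfix))]
      simp

theorem pvReplace_noop (s : String) (hni : ¬ [' ', ' '] <:+: s.toList) :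
    PySem.Str.replace s "  " " " = s := by
  unfold PySem.Str.replace PySem.Chars.replace
  rw [if_neg (by decide)]
  rw [pvReplace_go_noop _ _ _ _ _ (by simpa using hni)]
  simp

-- A's fold computes the flatMap of the tokens
theorem pvFoldA (sel : Int) (xs : List Int) (k : Int) (acc : String) :
    (List.foldl
      (fun acc p =>
        if p.1 ≠ sel then acc ++ (PySem.Int.toStr p.2 ++ " ")
        else acc ++ ("[ " ++ PySem.Int.toStr p.2 ++ " ] "))
      acc (PySem.List.enumerate xs k)).toList
    = acc.toList ++ (pvToks sel xs k).flatMap (· ++ [' ']) := by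
  induction xs generalizing k acc with
  | nil => simp [PySem.List.enumerate, pvToks]
  | cons n t ih =>
    rw [show PySem.List.enumerate (n :: t) k = (k, n) :: PySem.List.enumerate t (k + 1) from rfl]
    rw [List.foldl_cons, ih]
    simp only [pvToks, List.flatMap_cons]
    by_cases hk : k ≠ sel
    · rw [if_pos hk, if_pos hk]
      simp [pvTok, PySem.Int.toList_toStr, List.append_assoc]
    · rw [if_neg hk, if_neg hk]
      simp [pvBTok, PySem.Int.toList_toStr, List.append_assoc]

-- joining on the empty separator is flattening
theorem pvJoinNilFlatten (ls : List (List Char)) : PySem.Chars.join [] ls = ls.flatten := by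
  induction ls with
  | nil => simp [PySem.Chars.join_nil]
  | cons a r ih =>
    cases r with
    | nil => simp [PySem.Chars.join_singleton]
    | cons b u => rw [PySem.Chars.join_cons_cons, ih]; simp

-- B's uniform segment formatter, on the character level
theorem pvPlain_toList (xs : List Int) :
    (pvPlain xs).toList = xs.flatMap (fun x => pvTok x ++ [' ']) := by
  unfold pvPlain
  rw [PySem.Str.toList_join]
  rw [show ("" : String).toList = ([] : List Char) from rfl, pvJoinNilFlatten]
  rw [← List.flatMap_def]
  simp [List.flatMap_map, pvTok, PySem.Int.toList_toStr]

theorem visualise_sequence_spec : Claim_equal_visualise_sequence := by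
  intro sequence sel _
  unfold Spec_visualise_sequence visualise_sequence visualise_sequence_alt
  simp only []
  rw [pvReplace_noop _ (by
    rw [pvFoldA]
    simpa using pvNoDD _ (pvChain_flat _ (pvGood_toks sel sequence 0)))]
  rw [← String.toList_inj]
  rw [pvFoldA]
  by_cases h : 0 ≤ sel ∧ sel < (sequence.length : Int)
  · rw [if_pos h]
    obtain ⟨h0, h1⟩ := h
    have hs : sel.toNat < sequence.length := by omega
    have hsel : sel = ((sel.toNat : Nat) : Int) := by omega
    rw [hsel]
    rw [PySem.List.slice_to_natCast]
    rw [show ((sel.toNat : Nat) : Int) + 1 = ((sel.toNat + 1 : Nat) : Int) by push_cast; ring]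
    rw [PySem.List.slice_from_natCast]
    rw [PySem.List.pyGet?_natCast, List.getElem?_eq_getElem hs, Option.getD_some]
    have hsplit := pvToks_split sequence 0 sel.toNat hs
    rw [show (0 : Int) + ((sel.toNat : Nat) : Int) = ((sel.toNat : Nat) : Int) by ring] at hsplit
    rw [hsplit]
    simp only [List.flatMap_append, List.flatMap_cons, String.toList_append, pvPlain_toList]
    have hfm : ∀ l : List Int,
        List.flatMap (fun x => x ++ [' ']) (l.map pvTok) = List.flatMap (fun x => pvTok x ++ [' ']) l :=
      fun l => by rw [List.flatMap_map]
    rw [hfm, hfm]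
    simp [pvBTok, pvTok, PySem.Int.toList_toStr, List.append_assoc]
  · rw [if_neg h]
    rw [pvToks_out sel sequence 0 (by
      rw [not_and_or] at h
      simp only [not_le, not_lt] at h
      omega)]
    rw [pvPlain_toList]
    simp [pvTok, List.flatMap_map]

-- ===== VERDICT (by name: the statement is the Claim_ definition above) =====
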